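-- pv_equiv track=rewrite | github.com/davidgk/codeKatasPython | double_hanoi/double_hanoi.py | solution
-- ===== SOURCE A (Python) =====
-- def solution(list_of_disks, leftIncreasingValues, rightDecreasingValues):
--     left = [leftIncreasingValues]
--     right = [rightDecreasingValues]
--     for disk in list_of_disks:
--         original_left = len(left)
--         evaluate_info(disk, left)
--         if original_left == len(left):
--             evaluate_info(disk, right, False)
--     return len(left) + len(right) - 2
--
-- def evaluate_info(disk, aList, isLower=True):
--     if should_evaluated(aList, disk, isLower):
--         return analyse_data(disk, aList, isLower)
--     return aList
--
-- def should_evaluated(aList, disk, isLower=True):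
--     if disk not in aList:
--         evaluation_field = max(aList) if isLower else min(aList)
--         return disk < evaluation_field if isLower else disk > evaluation_field
--     return False
--
-- def analyse_data(disk, aList, isLower=True):
--     for idx, val in enumerate(aList):
--         next_val = obtain_next_val(disk, aList, idx + 1, isLower)
--         if isLower:
--             evaluate_and_add(disk, idx, aList, next_val, val)
--         evaluate_and_add(disk, idx, aList, val, next_val)
--     return aList
--
-- def obtain_next_val(disk, aList, next_idx, isLower=True):
--     default = (disk - 1) if isLower else (disk + 1)
--     return aList[next_idx] if next_idx < len(aList) else default
--
-- def evaluate_and_add(disk, idx, aList, maximum_val, minimum_val):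
--     if minimum_val > disk > maximum_val:
--         aList.insert(idx + 1, disk)
-- ===== SOURCE B (Python) =====
-- def solution(list_of_disks, leftIncreasingValues, rightDecreasingValues):
--     left = set()
--     right = set()
--     for disk in list_of_disks:
--         if disk < leftIncreasingValues and disk not in left:
--             left.add(disk)
--         elif disk > rightDecreasingValues and disk not in right:
--             right.add(disk)
--     return len(left) + len(right)
-- ===== Notes on version B (the rewrite author's own statement) =====
-- stated objective: simpler
-- what changed: Replaced the sorted-list machinery (max/min scans and nested position-seeking insertion loops) by a single pass over the disks maintaining two hash sets and returning the sum of their sizes.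
import Mathlib
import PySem

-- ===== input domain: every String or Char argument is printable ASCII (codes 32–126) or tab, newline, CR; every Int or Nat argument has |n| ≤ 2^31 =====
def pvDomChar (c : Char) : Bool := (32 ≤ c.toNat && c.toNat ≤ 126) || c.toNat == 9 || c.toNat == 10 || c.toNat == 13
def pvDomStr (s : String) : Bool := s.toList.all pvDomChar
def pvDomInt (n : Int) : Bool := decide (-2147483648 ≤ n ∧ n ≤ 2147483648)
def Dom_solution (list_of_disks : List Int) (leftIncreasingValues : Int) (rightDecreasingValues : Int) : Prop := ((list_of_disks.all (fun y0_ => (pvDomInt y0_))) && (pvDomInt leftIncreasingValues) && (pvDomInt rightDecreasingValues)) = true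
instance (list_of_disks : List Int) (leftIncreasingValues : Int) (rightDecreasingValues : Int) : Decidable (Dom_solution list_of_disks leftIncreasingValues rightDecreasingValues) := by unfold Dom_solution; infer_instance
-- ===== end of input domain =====

-- B replaces A's sorted-list insertion machinery by one pass over two sets; objective: simpler (and no quadratic list surgery).

-- ===== PORT A =====
def shouldEvaluated (aList : List Int) (disk : Int) (isLower : Bool) : Bool :=
  if disk ∉ aList then
    match (if isLower then PySem.List.max? aList (fun y => y) else PySem.List.min? aList (fun y => y)) with
    | some m => if isLower then decide (disk < m) else decide (m < disk)
    | none => false  -- Python's max/min raise on an empty list; unreachable from solution (its lists are never empty)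
  else false

def obtainNextVal (disk : Int) (aList : List Int) (nextIdx : Nat) (isLower : Bool) : Int :=
  if nextIdx < aList.length then aList.getD nextIdx 0  -- in-range read, = Python aList[next_idx]
  else if isLower then disk - 1 else disk + 1

def evaluateAndAdd (disk : Int) (idx : Nat) (aList : List Int) (maxV minV : Int) : List Int :=
  if minV > disk ∧ disk > maxV then PySem.List.insert aList ((idx : Int) + 1) disk else aList

-- Python's 'for idx, val in enumerate(aList)' over the live, mutating list: index-based loop; fuel is
-- a termination guard only (analyseData supplies fuel 2*len+2, enough for the at most len+1 iterations
-- the loop performs when called from solution).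
def analyseLoop (disk : Int) (isLower : Bool) : Nat → List Int → Nat → List Int
  | 0, aList, _ => aList
  | fuel+1, aList, idx =>
    if idx < aList.length then
      let val := aList.getD idx 0
      let next_val := obtainNextVal disk aList (idx+1) isLower
      let a1 := if isLower then evaluateAndAdd disk idx aList next_val val else aList
      let a2 := evaluateAndAdd disk idx a1 val next_val
      analyseLoop disk isLower fuel a2 (idx+1)
    else aList

def analyseData (disk : Int) (aList : List Int) (isLower : Bool) : List Int :=
  analyseLoop disk isLower (2 * aList.length + 2) aList 0

def evaluateInfo (disk : Int) (aList : List Int) (isLower : Bool) : List Int :=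
  if shouldEvaluated aList disk isLower then analyseData disk aList isLower else aList

def aStep (st : List Int × List Int) (disk : Int) : List Int × List Int :=
  let lnew := evaluateInfo disk st.1 true
  if st.1.length = lnew.length then (lnew, evaluateInfo disk st.2 false) else (lnew, st.2)

def solution (list_of_disks : List Int) (leftIncreasingValues : Int) (rightDecreasingValues : Int) : Int :=
  let st := list_of_disks.foldl aStep ([leftIncreasingValues], [rightDecreasingValues])
  PySem.List.len st.1 + PySem.List.len st.2 - 2

-- ===== PORT B =====
def bStep (l r : Int) (st : PySem.Set Int × PySem.Set Int) (disk : Int) : PySem.Set Int × PySem.Set Int :=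
  if disk < l ∧ PySem.Set.contains st.1 disk = false then (PySem.Set.add st.1 disk, st.2)
  else if r < disk ∧ PySem.Set.contains st.2 disk = false then (st.1, PySem.Set.add st.2 disk)
  else st

def solution_alt (list_of_disks : List Int) (leftIncreasingValues : Int) (rightDecreasingValues : Int) : Int :=
  let st := list_of_disks.foldl (bStep leftIncreasingValues rightDecreasingValues) (PySem.Set.empty, PySem.Set.empty)
  PySem.Set.len st.1 + PySem.Set.len st.2

-- ===== PRECONDITION & SPEC =====
def Spec_solution (list_of_disks : List Int) (leftIncreasingValues : Int) (rightDecreasingValues : Int) (out : Int) : Prop := out = solution_alt list_of_disks leftIncreasingValues rightDecreasingValues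
instance (list_of_disks : List Int) (leftIncreasingValues : Int) (rightDecreasingValues : Int) (out : Int) : Decidable (Spec_solution list_of_disks leftIncreasingValues rightDecreasingValues out) := by unfold Spec_solution; infer_instance

-- ===== CLAIM (what is proved, stated in full; the proofs are below) =====
def Claim_equal_solution : Prop := ∀ (list_of_disks : List Int) (leftIncreasingValues : Int) (rightDecreasingValues : Int), Dom_solution list_of_disks leftIncreasingValues rightDecreasingValues → Spec_solution list_of_disks leftIncreasingValues rightDecreasingValues (solution list_of_disks leftIncreasingValues rightDecreasingValues)

-- ===== LEMMAS AND PROOFS =====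

-- ordered insertion into a strictly descending list (what A's analyse_data(…, isLower=True) computes)
def insD (d : Int) : List Int → List Int
  | [] => [d]
  | v :: rest => if d < v then v :: insD d rest else d :: v :: rest

-- ordered insertion into a strictly ascending list (what A's analyse_data(…, isLower=False) computes)
def insA (d : Int) : List Int → List Int
  | [] => [d]
  | v :: rest => if v < d then v :: insA d rest else d :: v :: rest

lemma insD_perm (d : Int) (zs : List Int) : (insD d zs).Perm (d :: zs) := by
  induction zs with
  | nil => simp [insD]
  | cons v rest ih =>
    simp only [insD]
    split
    · exact (ih.cons v).trans (List.Perm.swap d v rest)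
    · exact List.Perm.refl _

lemma insA_perm (d : Int) (zs : List Int) : (insA d zs).Perm (d :: zs) := by
  induction zs with
  | nil => simp [insA]
  | cons v rest ih =>
    simp only [insA]
    split
    · exact (ih.cons v).trans (List.Perm.swap d v rest)
    · exact List.Perm.refl _

lemma insD_pairwise (d : Int) (zs : List Int) (hp : zs.Pairwise (· > ·)) (hd : d ∉ zs) :
    (insD d zs).Pairwise (· > ·) := by
  induction zs with
  | nil => simp [insD]
  | cons v rest ih =>
    rcases List.pairwise_cons.mp hp with ⟨hv, hrest⟩
    simp only [insD]
    split
    · rename_i hlt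
      refine List.pairwise_cons.mpr ⟨?_, ih hrest (fun h => hd (List.mem_cons_of_mem _ h))⟩
      intro x hx
      rcases List.mem_cons.mp ((insD_perm d rest).mem_iff.mp hx) with h | h
      · subst h; exact hlt
      · exact hv x h
    · rename_i hnlt
      have hne : d ≠ v := fun h => hd (h ▸ List.mem_cons_self)
      have hdv : v < d := lt_of_le_of_ne (not_lt.mp hnlt) (Ne.symm hne)
      refine List.pairwise_cons.mpr ⟨?_, hp⟩
      intro x hx
      rcases List.mem_cons.mp hx with h | h
      · subst h; exact hdv
      · exact lt_trans (hv x h) hdv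

lemma insA_pairwise (d : Int) (zs : List Int) (hp : zs.Pairwise (· < ·)) (hd : d ∉ zs) :
    (insA d zs).Pairwise (· < ·) := by
  induction zs with
  | nil => simp [insA]
  | cons v rest ih =>
    rcases List.pairwise_cons.mp hp with ⟨hv, hrest⟩
    simp only [insA]
    split
    · rename_i hlt
      refine List.pairwise_cons.mpr ⟨?_, ih hrest (fun h => hd (List.mem_cons_of_mem _ h))⟩
      intro x hx
      rcases List.mem_cons.mp ((insA_perm d rest).mem_iff.mp hx) with h | h
      · subst h; exact hlt
      · exact hv x h
    · rename_i hnlt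
      have hne : d ≠ v := fun h => hd (h ▸ List.mem_cons_self)
      have hdv : d < v := lt_of_le_of_ne (not_lt.mp hnlt) hne
      refine List.pairwise_cons.mpr ⟨?_, hp⟩
      intro x hx
      rcases List.mem_cons.mp hx with h | h
      · subst h; exact hdv
      · exact lt_trans hdv (hv x h)

lemma foldl_max_of_le (t : List Int) (a : Int) (h : ∀ x ∈ t, x ≤ a) : t.foldl max a = a := by
  induction t generalizing a with
  | nil => rfl
  | cons v rest ih =>
    have : max a v = a := max_eq_left (h v List.mem_cons_self)
    simpa [this] using ih a (fun x hx => h x (List.mem_cons_of_mem _ hx))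

lemma foldl_min_of_le (t : List Int) (a : Int) (h : ∀ x ∈ t, a ≤ x) : t.foldl min a = a := by
  induction t generalizing a with
  | nil => rfl
  | cons v rest ih =>
    have : min a v = a := min_eq_left (h v List.mem_cons_self)
    simpa [this] using ih a (fun x hx => h x (List.mem_cons_of_mem _ hx))

lemma shouldEval_left (l : Int) (t : List Int) (d : Int) (hp : (l :: t).Pairwise (· > ·)) :
    shouldEvaluated (l :: t) d true = true ↔ d < l ∧ d ∉ t := by
  rcases List.pairwise_cons.mp hp with ⟨hv, _⟩
  have hmax : PySem.List.max? (l :: t) (fun y => y) = some (t.foldl max l) :=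
    PySem.List.max?_id_cons l t
  have hfold : t.foldl max l = l := foldl_max_of_le t l (fun x hx => le_of_lt (hv x hx))
  unfold shouldEvaluated
  by_cases hmem : d ∈ l :: t
  · simp only [hmem, not_true_eq_false, if_false]
    constructor
    · intro h; exact absurd h (by simp)
    · rintro ⟨hdl, hdt⟩
      rcases List.mem_cons.mp hmem with h | h
      · exact absurd hdl (by omega)
      · exact absurd h hdt
  · simp only [hmem, not_false_eq_true, if_true, hmax, hfold]
    simp only [decide_eq_true_eq]
    constructor
    · intro h; exact ⟨h, fun hh => hmem (List.mem_cons_of_mem _ hh)⟩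
    · exact fun h => h.1

lemma shouldEval_right (r : Int) (t : List Int) (d : Int) (hp : (r :: t).Pairwise (· < ·)) :
    shouldEvaluated (r :: t) d false = true ↔ r < d ∧ d ∉ t := by
  rcases List.pairwise_cons.mp hp with ⟨hv, _⟩
  have hmin : PySem.List.min? (r :: t) (fun y => y) = some (t.foldl min r) :=
    PySem.List.min?_id_cons r t
  have hfold : t.foldl min r = r := foldl_min_of_le t r (fun x hx => le_of_lt (hv x hx))
  unfold shouldEvaluated
  by_cases hmem : d ∈ r :: t
  · simp only [hmem, not_true_eq_false, if_false]
    constructor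
    · intro h; exact absurd h (by simp)
    · rintro ⟨hdl, hdt⟩
      rcases List.mem_cons.mp hmem with h | h
      · exact absurd hdl (by omega)
      · exact absurd h hdt
  · simp only [hmem, not_false_eq_true, if_true, hmin, hfold]
    simp only [Bool.false_eq_true, if_false, decide_eq_true_eq]
    constructor
    · intro h; exact ⟨h, fun hh => hmem (List.mem_cons_of_mem _ hh)⟩
    · exact fun h => h.1

lemma getD_append_cons (ys t : List Int) (v : Int) : (ys ++ v :: t).getD ys.length 0 = v := by
  rw [List.getD_append_right _ _ _ _ (le_refl ys.length)]
  simp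

lemma getD_append_cons_succ (ys t : List Int) (u w : Int) :
    (ys ++ u :: w :: t).getD (ys.length + 1) 0 = w := by
  rw [List.getD_append_right _ _ _ _ (by omega : ys.length ≤ ys.length + 1)]
  simp

lemma pyInsert_after (ys t : List Int) (v d : Int) :
    PySem.List.insert (ys ++ v :: t) ((ys.length : Int) + 1) d = ys ++ v :: d :: t := by
  have h1 : ((ys.length : Int) + 1) = ((ys.length + 1 : Nat) : Int) := by push_cast; ring
  rw [h1, PySem.List.insert_natCast _ _ _ (by simp only [List.length_append, List.length_cons]; omega)]
  have ht : List.take (ys.length + 1) (ys ++ v :: t) = ys ++ [v] := by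
    rw [show ys.length + 1 = (ys ++ [v]).length by simp, show ys ++ v :: t = (ys ++ [v]) ++ t by simp]
    exact List.take_left
  have hd : List.drop (ys.length + 1) (ys ++ v :: t) = t := by
    rw [show ys.length + 1 = (ys ++ [v]).length by simp, show ys ++ v :: t = (ys ++ [v]) ++ t by simp]
    exact List.drop_left
  rw [ht, hd]; simp

lemma analyseLoop_stop (disk : Int) (b : Bool) (f : Nat) (aList : List Int) (idx : Nat)
    (h : ¬ idx < aList.length) : analyseLoop disk b (f+1) aList idx = aList := by
  simp [analyseLoop, h]

lemma analyseLoop_succ_true (disk : Int) (f : Nat) (aList : List Int) (idx : Nat)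
    (h : idx < aList.length) :
    analyseLoop disk true (f+1) aList idx =
      analyseLoop disk true f
        (evaluateAndAdd disk idx
          (evaluateAndAdd disk idx aList (obtainNextVal disk aList (idx+1) true) (aList.getD idx 0))
          (aList.getD idx 0) (obtainNextVal disk aList (idx+1) true)) (idx+1) := by
  simp [analyseLoop, h]

lemma analyseLoop_succ_false (disk : Int) (f : Nat) (aList : List Int) (idx : Nat)
    (h : idx < aList.length) :
    analyseLoop disk false (f+1) aList idx =
      analyseLoop disk false f
        (evaluateAndAdd disk idx aList (aList.getD idx 0) (obtainNextVal disk aList (idx+1) false))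
        (idx+1) := by
  simp [analyseLoop, h]

lemma loopDone_true (d : Int) : ∀ (zs : List Int) (fuel : Nat) (ys : List Int),
    (∀ x ∈ zs, x ≤ d) → zs.length < fuel →
    analyseLoop d true fuel (ys ++ zs) ys.length = ys ++ zs := by
  intro zs
  induction zs with
  | nil =>
    intro fuel ys _ hf
    obtain ⟨f, rfl⟩ : ∃ f, fuel = f + 1 := ⟨fuel - 1, by omega⟩
    exact analyseLoop_stop d true f (ys ++ []) ys.length (by simp)
  | cons v rest ih =>
    intro fuel ys hle hf
    obtain ⟨f, rfl⟩ : ∃ f, fuel = f + 1 := ⟨fuel - 1, by omega⟩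
    have hvle : v ≤ d := hle v List.mem_cons_self
    rw [analyseLoop_succ_true d f _ _ (by simp)]
    have hval : (ys ++ v :: rest).getD ys.length 0 = v := getD_append_cons ys rest v
    have hnv : obtainNextVal d (ys ++ v :: rest) (ys.length + 1) true ≤ d := by
      unfold obtainNextVal
      split
      · rename_i hin
        cases rest with
        | nil => simp at hin
        | cons w rest' =>
          rw [getD_append_cons_succ ys rest' v w]
          exact hle w (by simp)
      · rw [if_pos rfl]; omega
    have h1 : evaluateAndAdd d ys.length (ys ++ v :: rest)
        (obtainNextVal d (ys ++ v :: rest) (ys.length + 1) true) v = ys ++ v :: rest := by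
      unfold evaluateAndAdd; rw [if_neg (by omega)]
    have h2 : evaluateAndAdd d ys.length (ys ++ v :: rest) v
        (obtainNextVal d (ys ++ v :: rest) (ys.length + 1) true) = ys ++ v :: rest := by
      unfold evaluateAndAdd; rw [if_neg (by omega)]
    rw [hval, h1, h2]
    rw [show ys ++ v :: rest = (ys ++ [v]) ++ rest by simp,
        show ys.length + 1 = (ys ++ [v]).length by simp]
    exact ih f (ys ++ [v]) (fun x hx => hle x (List.mem_cons_of_mem _ hx))
      (by simp only [List.length_cons] at hf; omega)

lemma loopDone_false (d : Int) : ∀ (zs : List Int) (fuel : Nat) (ys : List Int),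
    (∀ x ∈ zs, d ≤ x) → zs.length < fuel →
    analyseLoop d false fuel (ys ++ zs) ys.length = ys ++ zs := by
  intro zs
  induction zs with
  | nil =>
    intro fuel ys _ hf
    obtain ⟨f, rfl⟩ : ∃ f, fuel = f + 1 := ⟨fuel - 1, by omega⟩
    exact analyseLoop_stop d false f (ys ++ []) ys.length (by simp)
  | cons v rest ih =>
    intro fuel ys hle hf
    obtain ⟨f, rfl⟩ : ∃ f, fuel = f + 1 := ⟨fuel - 1, by omega⟩
    have hvle : d ≤ v := hle v List.mem_cons_self
    rw [analyseLoop_succ_false d f _ _ (by simp)]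
    have hval : (ys ++ v :: rest).getD ys.length 0 = v := getD_append_cons ys rest v
    have h2 : evaluateAndAdd d ys.length (ys ++ v :: rest) v
        (obtainNextVal d (ys ++ v :: rest) (ys.length + 1) false) = ys ++ v :: rest := by
      unfold evaluateAndAdd; rw [if_neg (by omega)]
    rw [hval, h2]
    rw [show ys ++ v :: rest = (ys ++ [v]) ++ rest by simp,
        show ys.length + 1 = (ys ++ [v]).length by simp]
    exact ih f (ys ++ [v]) (fun x hx => hle x (List.mem_cons_of_mem _ hx))
      (by simp only [List.length_cons] at hf; omega)

lemma loopIns_true (d : Int) : ∀ (rest : List Int) (fuel : Nat) (ys : List Int) (v : Int),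
    (v :: rest).Pairwise (· > ·) → d ∉ v :: rest → d < v → rest.length + 3 ≤ fuel →
    analyseLoop d true fuel (ys ++ v :: rest) ys.length = ys ++ insD d (v :: rest) := by
  intro rest
  induction rest with
  | nil =>
    intro fuel ys v _ _ hdv hf
    obtain ⟨f, rfl⟩ : ∃ f, fuel = f + 1 := ⟨fuel - 1, by omega⟩
    rw [analyseLoop_succ_true d f _ _ (by simp)]
    have hval : (ys ++ [v]).getD ys.length 0 = v := getD_append_cons ys [] v
    have hnv : obtainNextVal d (ys ++ [v]) (ys.length + 1) true = d - 1 := by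
      unfold obtainNextVal
      rw [if_neg (by simp), if_pos rfl]
    have h1 : evaluateAndAdd d ys.length (ys ++ [v]) (d - 1) v = ys ++ v :: d :: [] := by
      unfold evaluateAndAdd
      rw [if_pos ⟨hdv, by omega⟩]
      exact pyInsert_after ys [] v d
    have h2 : evaluateAndAdd d ys.length (ys ++ v :: d :: []) v (d - 1) = ys ++ v :: d :: [] := by
      unfold evaluateAndAdd; rw [if_neg (by omega)]
    rw [hval, hnv, h1, h2]
    rw [show ys ++ v :: d :: [] = (ys ++ [v]) ++ [d] by simp,
        show ys.length + 1 = (ys ++ [v]).length by simp]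
    rw [loopDone_true d [d] f (ys ++ [v]) (by simp)
      (by simp only [List.length_nil] at hf ⊢; simp; omega)]
    simp [insD, hdv]
  | cons w rest' ih =>
    intro fuel ys v hp hmem hdv hf
    obtain ⟨f, rfl⟩ : ∃ f, fuel = f + 1 := ⟨fuel - 1, by omega⟩
    rcases List.pairwise_cons.mp hp with ⟨hv, hp'⟩
    rcases List.pairwise_cons.mp hp' with ⟨hw, _⟩
    have hdnw : d ≠ w := by intro h; exact hmem (by simp [h])
    rw [analyseLoop_succ_true d f _ _ (by simp)]
    have hval : (ys ++ v :: w :: rest').getD ys.length 0 = v := getD_append_cons ys (w :: rest') v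
    have hnv : obtainNextVal d (ys ++ v :: w :: rest') (ys.length + 1) true = w := by
      unfold obtainNextVal
      rw [if_pos (by simp only [List.length_append, List.length_cons]; omega)]
      exact getD_append_cons_succ ys rest' v w
    by_cases hwd : w < d
    · have h1 : evaluateAndAdd d ys.length (ys ++ v :: w :: rest') w v
          = ys ++ v :: d :: w :: rest' := by
        unfold evaluateAndAdd
        rw [if_pos ⟨hdv, hwd⟩]
        exact pyInsert_after ys (w :: rest') v d
      have h2 : evaluateAndAdd d ys.length (ys ++ v :: d :: w :: rest') v w
          = ys ++ v :: d :: w :: rest' := by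
        unfold evaluateAndAdd; rw [if_neg (by omega)]
      rw [hval, hnv, h1, h2]
      rw [show ys ++ v :: d :: w :: rest' = (ys ++ [v]) ++ (d :: w :: rest') by simp,
          show ys.length + 1 = (ys ++ [v]).length by simp]
      rw [loopDone_true d (d :: w :: rest') f (ys ++ [v])
        (by
          intro x hx
          rcases List.mem_cons.mp hx with h | h
          · omega
          · rcases List.mem_cons.mp h with h' | h'
            · omega
            · have := hw x h'; omega)
        (by simp only [List.length_cons] at hf ⊢; omega)]
      simp [insD, hdv, show ¬ d < w by omega]
    · have hdw : d < w := lt_of_le_of_ne (not_lt.mp hwd) hdnw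
      have h1 : evaluateAndAdd d ys.length (ys ++ v :: w :: rest') w v
          = ys ++ v :: w :: rest' := by
        unfold evaluateAndAdd; rw [if_neg (by omega)]
      have h2 : evaluateAndAdd d ys.length (ys ++ v :: w :: rest') v w
          = ys ++ v :: w :: rest' := by
        unfold evaluateAndAdd; rw [if_neg (by omega)]
      rw [hval, hnv, h1, h2]
      rw [show ys ++ v :: w :: rest' = (ys ++ [v]) ++ (w :: rest') by simp,
          show ys.length + 1 = (ys ++ [v]).length by simp]
      rw [ih f (ys ++ [v]) w hp' (fun h => hmem (List.mem_cons_of_mem _ h)) hdw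
        (by simp only [List.length_cons] at hf ⊢; omega)]
      simp [insD, hdv]

lemma loopIns_false (d : Int) : ∀ (rest : List Int) (fuel : Nat) (ys : List Int) (v : Int),
    (v :: rest).Pairwise (· < ·) → d ∉ v :: rest → v < d → rest.length + 3 ≤ fuel →
    analyseLoop d false fuel (ys ++ v :: rest) ys.length = ys ++ insA d (v :: rest) := by
  intro rest
  induction rest with
  | nil =>
    intro fuel ys v _ _ hdv hf
    obtain ⟨f, rfl⟩ : ∃ f, fuel = f + 1 := ⟨fuel - 1, by omega⟩
    rw [analyseLoop_succ_false d f _ _ (by simp)]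
    have hval : (ys ++ [v]).getD ys.length 0 = v := getD_append_cons ys [] v
    have hnv : obtainNextVal d (ys ++ [v]) (ys.length + 1) false = d + 1 := by
      unfold obtainNextVal
      rw [if_neg (by simp), if_neg (by simp)]
    have h2 : evaluateAndAdd d ys.length (ys ++ [v]) v (d + 1) = ys ++ v :: d :: [] := by
      unfold evaluateAndAdd
      rw [if_pos ⟨by omega, hdv⟩]
      exact pyInsert_after ys [] v d
    rw [hval, hnv, h2]
    rw [show ys ++ v :: d :: [] = (ys ++ [v]) ++ [d] by simp,
        show ys.length + 1 = (ys ++ [v]).length by simp]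
    rw [loopDone_false d [d] f (ys ++ [v]) (by simp)
      (by simp only [List.length_nil] at hf ⊢; simp; omega)]
    simp [insA, hdv]
  | cons w rest' ih =>
    intro fuel ys v hp hmem hdv hf
    obtain ⟨f, rfl⟩ : ∃ f, fuel = f + 1 := ⟨fuel - 1, by omega⟩
    rcases List.pairwise_cons.mp hp with ⟨hv, hp'⟩
    rcases List.pairwise_cons.mp hp' with ⟨hw, _⟩
    have hdnw : d ≠ w := by intro h; exact hmem (by simp [h])
    rw [analyseLoop_succ_false d f _ _ (by simp)]
    have hval : (ys ++ v :: w :: rest').getD ys.length 0 = v := getD_append_cons ys (w :: rest') v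
    have hnv : obtainNextVal d (ys ++ v :: w :: rest') (ys.length + 1) false = w := by
      unfold obtainNextVal
      rw [if_pos (by simp only [List.length_append, List.length_cons]; omega)]
      exact getD_append_cons_succ ys rest' v w
    by_cases hwd : d < w
    · have h2 : evaluateAndAdd d ys.length (ys ++ v :: w :: rest') v w
          = ys ++ v :: d :: w :: rest' := by
        unfold evaluateAndAdd
        rw [if_pos ⟨hwd, hdv⟩]
        exact pyInsert_after ys (w :: rest') v d
      rw [hval, hnv, h2]
      rw [show ys ++ v :: d :: w :: rest' = (ys ++ [v]) ++ (d :: w :: rest') by simp,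
          show ys.length + 1 = (ys ++ [v]).length by simp]
      rw [loopDone_false d (d :: w :: rest') f (ys ++ [v])
        (by
          intro x hx
          rcases List.mem_cons.mp hx with h | h
          · omega
          · rcases List.mem_cons.mp h with h' | h'
            · omega
            · have := hw x h'; omega)
        (by simp only [List.length_cons] at hf ⊢; omega)]
      simp [insA, hdv, show ¬ w < d by omega]
    · have hdw : w < d := lt_of_le_of_ne (not_lt.mp hwd) (Ne.symm hdnw)
      have h2 : evaluateAndAdd d ys.length (ys ++ v :: w :: rest') v w
          = ys ++ v :: w :: rest' := by
        unfold evaluateAndAdd; rw [if_neg (by omega)]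
      rw [hval, hnv, h2]
      rw [show ys ++ v :: w :: rest' = (ys ++ [v]) ++ (w :: rest') by simp,
          show ys.length + 1 = (ys ++ [v]).length by simp]
      rw [ih f (ys ++ [v]) w hp' (fun h => hmem (List.mem_cons_of_mem _ h)) hdw
        (by simp only [List.length_cons] at hf ⊢; omega)]
      simp [insA, hdv]

lemma analyseData_left (d l : Int) (t : List Int) (hp : (l :: t).Pairwise (· > ·))
    (hmem : d ∉ l :: t) (hdl : d < l) :
    analyseData d (l :: t) true = l :: insD d t := by
  unfold analyseData
  have := loopIns_true d t (2 * (l :: t).length + 2) [] l hp hmem hdl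
    (by simp only [List.length_cons]; omega)
  simpa [insD, hdl] using this

lemma analyseData_right (d r : Int) (t : List Int) (hp : (r :: t).Pairwise (· < ·))
    (hmem : d ∉ r :: t) (hdr : r < d) :
    analyseData d (r :: t) false = r :: insA d t := by
  unfold analyseData
  have := loopIns_false d t (2 * (r :: t).length + 2) [] r hp hmem hdr
    (by simp only [List.length_cons]; omega)
  simpa [insA, hdr] using this

lemma set_contains_of_perm (t s : List Int) (h : t.Perm s) (d : Int) :
    PySem.Set.contains s d = false ↔ d ∉ t := by
  simp [PySem.Set.contains, h.mem_iff]

lemma set_add_not_mem (s : List Int) (d : Int) (h : PySem.Set.contains s d = false) :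
    PySem.Set.add s d = s ++ [d] := by
  have hm : d ∉ s := by simpa [PySem.Set.contains] using h
  simp [PySem.Set.add, PySem.Set.contains, hm]

lemma loop_len (l r : Int) : ∀ (disks lt rt ls rs : List Int),
    (l :: lt).Pairwise (· > ·) → (r :: rt).Pairwise (· < ·) →
    lt.Perm ls → rt.Perm rs →
    ((disks.foldl aStep (l :: lt, r :: rt)).1.length
      + (disks.foldl aStep (l :: lt, r :: rt)).2.length)
    = ((disks.foldl (bStep l r) (ls, rs)).1.length
      + (disks.foldl (bStep l r) (ls, rs)).2.length) + 2 := by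
  intro disks
  induction disks with
  | nil =>
    intro lt rt ls rs _ _ hpl hpr
    have h1 := hpl.length_eq
    have h2 := hpr.length_eq
    simp only [List.foldl_nil, List.length_cons]
    omega
  | cons d disks ih =>
    intro lt rt ls rs hL hR hpl hpr
    simp only [List.foldl_cons]
    by_cases h1 : d < l ∧ d ∉ lt
    · -- goes to the left side
      have hmem : d ∉ l :: lt := by
        intro h
        rcases List.mem_cons.mp h with h' | h'
        · omega
        · exact h1.2 h'
      have hse : shouldEvaluated (l :: lt) d true = true :=
        (shouldEval_left l lt d hL).mpr h1
      have hstepA : aStep (l :: lt, r :: rt) d = (l :: insD d lt, r :: rt) := by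
        unfold aStep evaluateInfo
        simp only [hse, if_true]
        rw [analyseData_left d l lt hL hmem h1.1]
        rw [if_neg (by
          have := (insD_perm d lt).length_eq
          simp [this])]
      have hcont : PySem.Set.contains ls d = false := (set_contains_of_perm lt ls hpl d).mpr h1.2
      have hstepB : bStep l r (ls, rs) d = (ls ++ [d], rs) := by
        unfold bStep
        rw [if_pos ⟨h1.1, hcont⟩, set_add_not_mem ls d hcont]
      rw [hstepA, hstepB]
      exact ih (insD d lt) rt (ls ++ [d]) rs
        (by
          have := insD_pairwise d (l :: lt) hL hmem
          simpa [insD, if_pos h1.1] using this)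
        hR
        ((insD_perm d lt).trans ((hpl.cons d).trans (List.perm_append_singleton d ls).symm))
        hpr
    · -- left unchanged
      have hse : shouldEvaluated (l :: lt) d true = false := by
        rcases Bool.eq_false_or_eq_true (shouldEvaluated (l :: lt) d true) with h | h
        · exact absurd ((shouldEval_left l lt d hL).mp h) h1
        · exact h
      have hBfirst : ¬ (d < l ∧ PySem.Set.contains ls d = false) := by
        intro ⟨ha, hb⟩
        exact h1 ⟨ha, (set_contains_of_perm lt ls hpl d).mp hb⟩
      by_cases h2 : r < d ∧ d ∉ rt
      · have hmem : d ∉ r :: rt := by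
          intro h
          rcases List.mem_cons.mp h with h' | h'
          · omega
          · exact h2.2 h'
        have hse2 : shouldEvaluated (r :: rt) d false = true :=
          (shouldEval_right r rt d hR).mpr h2
        have hstepA : aStep (l :: lt, r :: rt) d = (l :: lt, r :: insA d rt) := by
          unfold aStep evaluateInfo
          simp only [hse, Bool.false_eq_true, if_false, hse2, if_true]
          rw [analyseData_right d r rt hR hmem h2.1]
        have hcont : PySem.Set.contains rs d = false := (set_contains_of_perm rt rs hpr d).mpr h2.2
        have hstepB : bStep l r (ls, rs) d = (ls, rs ++ [d]) := by
          unfold bStep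
          rw [if_neg hBfirst, if_pos ⟨h2.1, hcont⟩, set_add_not_mem rs d hcont]
        rw [hstepA, hstepB]
        exact ih lt (insA d rt) ls (rs ++ [d])
          hL
          (by
            have := insA_pairwise d (r :: rt) hR hmem
            simpa [insA, if_pos h2.1] using this)
          hpl
          ((insA_perm d rt).trans ((hpr.cons d).trans (List.perm_append_singleton d rs).symm))
      · have hse2 : shouldEvaluated (r :: rt) d false = false := by
          rcases Bool.eq_false_or_eq_true (shouldEvaluated (r :: rt) d false) with h | h
          · exact absurd ((shouldEval_right r rt d hR).mp h) h2
          · exact h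
        have hstepA : aStep (l :: lt, r :: rt) d = (l :: lt, r :: rt) := by
          unfold aStep evaluateInfo
          simp [hse, hse2]
        have hstepB : bStep l r (ls, rs) d = (ls, rs) := by
          unfold bStep
          rw [if_neg hBfirst, if_neg (by
            intro ⟨ha, hb⟩
            exact h2 ⟨ha, (set_contains_of_perm rt rs hpr d).mp hb⟩)]
        rw [hstepA, hstepB]
        exact ih lt rt ls rs hL hR hpl hpr

-- ===== VERDICT (by name: the statement is the Claim_ definition above) =====
theorem solution_spec : Claim_equal_solution := by
  unfold Claim_equal_solution
  intro disks l r _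
  unfold Spec_solution solution solution_alt
  have h := loop_len l r disks [] [] [] []
    (by simp) (by simp) (List.Perm.refl _) (List.Perm.refl _)
  simp only [PySem.List.len_eq, PySem.Set.len, PySem.Set.empty] at *
  omega
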